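-- pv_equiv track=rewrite | github.com/dongseok1220/recognition-unified | sitstand/get_frames.py | get_action_frames
-- ===== SOURCE A (Python) =====
-- def get_action_frames(action_detected, fps):
--     # Initialize an empty list for storing action frames
--     action_frames = [0] * len(action_detected) * fps
--
--     # Calculate the step size based on the overlap ratio
--     step_size = int(fps)
--
--     # Assign True to the action frames
--     for i in range(0, len(action_detected)):
--         if action_detected[i]:
--             for j in range(i*step_size, i*step_size+fps):
--                 if j < len(action_frames):  # Make sure not to exceed the length of action_frames
--                     action_frames[j] = 1
--
--     return action_frames
-- ===== SOURCE B (Python) =====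
-- def get_action_frames(action_detected, fps):
--     # Build the output in one forward pass: append a whole block per flag.
--     frames = []
--     for a in action_detected:
--         frames += [1] * fps if a else [0] * fps
--     return frames
-- ===== Notes on version B (the rewrite author's own statement) =====
-- stated objective: simpler
-- what changed: Replaces the preallocate-zeros-then-scatter-write with its inner index loop and bounds check by a single forward pass that appends one [1]*fps or [0]*fps block per flag.
import Mathlib
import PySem

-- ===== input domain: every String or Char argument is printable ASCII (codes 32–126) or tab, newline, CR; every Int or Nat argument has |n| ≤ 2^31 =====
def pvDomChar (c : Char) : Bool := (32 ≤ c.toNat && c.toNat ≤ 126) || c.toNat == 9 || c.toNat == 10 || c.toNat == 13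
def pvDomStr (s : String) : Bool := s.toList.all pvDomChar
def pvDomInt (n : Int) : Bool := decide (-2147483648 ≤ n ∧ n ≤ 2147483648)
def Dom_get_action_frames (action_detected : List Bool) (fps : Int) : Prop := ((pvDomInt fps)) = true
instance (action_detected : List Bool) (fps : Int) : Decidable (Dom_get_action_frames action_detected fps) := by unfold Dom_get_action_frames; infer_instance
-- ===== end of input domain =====

-- B builds the output in one forward pass appending a block per flag instead of
-- preallocating zeros and scatter-writing by index (objective: simpler).

-- ===== PORT A =====
-- inner loop body: `if j < len(action_frames): action_frames[j] = 1`
def pvSetA (af : List Int) (j : Int) : List Int :=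
  if j < (af.length : Int) then PySem.List.pySetD af j 1 else af

-- outer loop body: `if action_detected[i]: for j in range(i*step_size, i*step_size+fps): …`
-- (step_size = int(fps) = fps; action_detected[i] is in range for every i of the outer range)
def pvStepA (ad : List Bool) (fps : Int) (af : List Int) (i : Int) : List Int :=
  if PySem.List.pyGetD ad i false = true then
    (PySem.List.pyRange (i * fps) (i * fps + fps) 1).foldl pvSetA af
  else af

def get_action_frames (action_detected : List Bool) (fps : Int) : List Int :=
  (PySem.List.pyRange 0 (action_detected.length : Int) 1).foldl
    (pvStepA action_detected fps)
    (List.replicate ((action_detected.length : Int) * fps).toNat 0)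

-- ===== PORT B =====
-- `frames += [1]*fps if a else [0]*fps`
def pvStepB (fps : Int) (frames : List Int) (a : Bool) : List Int :=
  frames ++ List.replicate fps.toNat (if a then 1 else 0)

def get_action_frames_alt (action_detected : List Bool) (fps : Int) : List Int :=
  action_detected.foldl (pvStepB fps) []

-- ===== PRECONDITION & SPEC =====
def Spec_get_action_frames (action_detected : List Bool) (fps : Int) (out : List Int) : Prop := out = get_action_frames_alt action_detected fps
instance (action_detected : List Bool) (fps : Int) (out : List Int) : Decidable (Spec_get_action_frames action_detected fps out) := by unfold Spec_get_action_frames; infer_instance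

-- ===== CLAIM (what is proved, stated in full; the proofs are below) =====
def Claim_equal_get_action_frames : Prop := ∀ (action_detected : List Bool) (fps : Int), Dom_get_action_frames action_detected fps → Spec_get_action_frames action_detected fps (get_action_frames action_detected fps)

-- ===== LEMMAS AND PROOFS =====

-- the inner fold and the outer fold preserve the length of the frame list
lemma pvSetA_length (af : List Int) (j : Int) : (pvSetA af j).length = af.length := by
  unfold pvSetA; split <;> simp [PySem.List.length_pySetD]

lemma pvInner_length (js : List Int) (af : List Int) :
    (js.foldl pvSetA af).length = af.length := by
  induction js generalizing af with
  | nil => rfl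
  | cons j js ih => simp [List.foldl_cons, ih, pvSetA_length]

lemma pvStepA_length (ad : List Bool) (fps : Int) (af : List Int) (i : Int) :
    (pvStepA ad fps af i).length = af.length := by
  unfold pvStepA; split <;> simp [pvInner_length]

lemma pvOuter_length (ad : List Bool) (fps : Int) (is : List Int) (af : List Int) :
    (is.foldl (pvStepA ad fps) af).length = af.length := by
  induction is generalizing af with
  | nil => rfl
  | cons i is ih => simp [List.foldl_cons, ih, pvStepA_length]

-- the inner fold touches only indices below |X|, hence commutes with ++ Y
lemma pvInner_append (js : List Int) (X Y : List Int)
    (hj : ∀ j ∈ js, 0 ≤ j ∧ j < (X.length : Int)) :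
    js.foldl pvSetA (X ++ Y) = js.foldl pvSetA X ++ Y := by
  induction js generalizing X with
  | nil => rfl
  | cons j js ih =>
      obtain ⟨hj0, hjX⟩ := hj j (by simp)
      have hset : pvSetA (X ++ Y) j = pvSetA X j ++ Y := by
        unfold pvSetA
        rw [if_pos (by simp; omega), if_pos hjX,
          PySem.List.pySetD_of_nonneg _ _ hj0, PySem.List.pySetD_of_nonneg _ _ hj0,
          List.set_append, if_pos (by omega)]
      rw [List.foldl_cons, List.foldl_cons, hset,
        ih _ (fun j' hj' => by
          have := hj j' (by simp [hj']); simpa [pvSetA_length] using this)]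

-- the outer fold, over indices whose blocks lie inside X, commutes with ++ Y
lemma pvOuter_append (ad : List Bool) (fps : Int) (hf : 0 < fps) (is : List Int)
    (X Y : List Int)
    (hb : ∀ i ∈ is, 0 ≤ i ∧ (i + 1) * fps ≤ (X.length : Int)) :
    is.foldl (pvStepA ad fps) (X ++ Y) = is.foldl (pvStepA ad fps) X ++ Y := by
  induction is generalizing X with
  | nil => rfl
  | cons i is ih =>
      obtain ⟨hi0, hiX⟩ := hb i (by simp)
      have hstep : pvStepA ad fps (X ++ Y) i = pvStepA ad fps X i ++ Y := by
        unfold pvStepA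
        split
        · exact pvInner_append _ _ _ (fun j hj => by
            rw [PySem.List.mem_pyRange_one] at hj
            constructor
            · nlinarith
            · nlinarith)
        · rfl
      rw [List.foldl_cons, List.foldl_cons, hstep,
        ih _ (fun i' hi' => by
          have := hb i' (by simp [hi']); simpa [pvStepA_length] using this)]

-- setting the block [|P|, |P|+k) of P ++ 0^k to ones yields P ++ 1^k
lemma pvSetBlock (k : Nat) : ∀ (P : List Int),
    (PySem.List.pyRange (P.length : Int) ((P.length : Int) + (k : Int)) 1).foldl pvSetA
      (P ++ List.replicate k 0) = P ++ List.replicate k 1 := by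
  induction k with
  | zero => intro P; simp [PySem.List.pyRange_one_eq_nil]
  | succ k ih =>
      intro P
      rw [PySem.List.pyRange_one_cons (by push_cast; omega), List.foldl_cons]
      have hset : pvSetA (P ++ List.replicate (k + 1) 0) (P.length : Int)
          = (P ++ [1]) ++ List.replicate k 0 := by
        unfold pvSetA
        rw [if_pos (by simp), PySem.List.pySetD_of_nonneg _ _ (by positivity),
          List.set_append, if_neg (by simp), List.replicate_succ]
        simp
      rw [hset]
      have h2 := ih (P ++ [1])
      simp only [List.length_append, List.length_cons, List.length_nil] at h2
      push_cast at h2 ⊢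
      rw [show ((P.length : Int) + ((k : Int) + 1)) = (P.length : Int) + 1 + (k : Int) by ring, h2]
      simp [List.replicate_succ, List.append_assoc]

-- A's result for fps ≤ 0 is [] (length is preserved from the empty initial list)
lemma pvA_nonpos (ad : List Bool) (fps : Int) (hf : fps ≤ 0) :
    get_action_frames ad fps = [] := by
  have h0 : ((ad.length : Int) * fps).toNat = 0 := by
    have : (ad.length : Int) * fps ≤ 0 := mul_nonpos_of_nonneg_of_nonpos (by positivity) hf
    omega
  unfold get_action_frames
  rw [h0, List.eq_nil_iff_length_eq_zero, List.replicate_zero, pvOuter_length]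
  rfl

lemma pvB_nonpos (ad : List Bool) (fps : Int) (hf : fps ≤ 0) :
    get_action_frames_alt ad fps = [] := by
  unfold get_action_frames_alt
  have : fps.toNat = 0 := by omega
  induction ad with
  | nil => rfl
  | cons a ad ih => simpa [pvStepB, this] using ih

-- main equivalence for fps > 0, by induction on the flag list from the right
lemma pv_main (fps : Int) (hf : 0 < fps) (ad : List Bool) :
    get_action_frames ad fps = get_action_frames_alt ad fps := by
  induction ad using List.reverseRecOn with
  | nil => simp [get_action_frames, get_action_frames_alt]
  | append_singleton ad a ih =>
      have hB : get_action_frames_alt (ad ++ [a]) fps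
          = get_action_frames_alt ad fps ++ List.replicate fps.toNat (if a then 1 else 0) := by
        unfold get_action_frames_alt; rw [List.foldl_append]; rfl
      have hnn : (0:Int) ≤ (ad.length : Int) * fps := by positivity
      have hsplit : (((ad.length : Int) + 1) * fps).toNat
          = ((ad.length : Int) * fps).toNat + fps.toNat := by
        have h1 : ((ad.length : Int) + 1) * fps = (ad.length : Int) * fps + fps := by ring
        omega
      have hlen : ((ad ++ [a]).length : Int) = (ad.length : Int) + 1 := by simp
      unfold get_action_frames
      rw [hlen, hsplit, List.replicate_add,
        PySem.List.pyRange_one_succ_right (by positivity), List.foldl_append,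
        pvOuter_append (ad ++ [a]) fps hf _ _ _ (fun i hi => by
          rw [PySem.List.mem_pyRange_one] at hi
          refine ⟨hi.1, ?_⟩
          rw [List.length_replicate, Int.toNat_of_nonneg hnn]
          have : i + 1 ≤ (ad.length : Int) := by omega
          exact mul_le_mul_of_nonneg_right this (le_of_lt hf))]
      have hcongr : List.foldl (pvStepA (ad ++ [a]) fps)
          (List.replicate ((ad.length : Int) * fps).toNat 0)
          (PySem.List.pyRange 0 (ad.length : Int) 1)
          = get_action_frames ad fps :=
        PySem.List.foldl_congr_mem _ _ (pvStepA ad fps) _ (fun af i hi => by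
          rw [PySem.List.mem_pyRange_one] at hi
          unfold pvStepA
          rw [PySem.List.pyGetD_of_nonneg _ _ hi.1, PySem.List.pyGetD_of_nonneg _ _ hi.1,
            List.getD, List.getD, List.getElem?_append_left (by omega)])
      rw [hcongr, List.foldl_cons, List.foldl_nil]
      have hPlen : ((get_action_frames ad fps).length : Int) = (ad.length : Int) * fps := by
        unfold get_action_frames
        rw [pvOuter_length, List.length_replicate, Int.toNat_of_nonneg hnn]
      have hget : PySem.List.pyGetD (ad ++ [a]) (ad.length : Int) false = a := by
        rw [PySem.List.pyGetD_of_nonneg _ _ (by positivity), List.getD]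
        simp
      unfold pvStepA
      rw [hget]
      cases a with
      | false =>
          simp only [Bool.false_eq_true, ite_false]
          rw [hB, ih]
          simp
      | true =>
          simp only [ite_true]
          have hblock := pvSetBlock fps.toNat (get_action_frames ad fps)
          rw [show (ad.length : Int) * fps = ((get_action_frames ad fps).length : Int) by rw [hPlen],
            show ((get_action_frames ad fps).length : Int) + fps
               = ((get_action_frames ad fps).length : Int) + (fps.toNat : Int) by
              rw [Int.toNat_of_nonneg (le_of_lt hf)],
            hblock, hB, ih]
          simp

-- ===== VERDICT (by name: the statement is the Claim_ definition above) =====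
theorem get_action_frames_spec : Claim_equal_get_action_frames := by
  intro ad fps _
  unfold Spec_get_action_frames
  by_cases hf : fps ≤ 0
  · rw [pvA_nonpos ad fps hf, pvB_nonpos ad fps hf]
  · exact pv_main fps (by omega) ad
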